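-- pv_equiv track=rewrite | github.com/Ambilibala/dsa_python | neearest_smaller_tower.py | nearest_shorter_tower
-- ===== SOURCE A (Python) =====
-- def nearest_shorter_tower(heights):
--     n = len(heights)
--     result = [-1] * n  # Start with -1 (means no shorter tower found)
--
--     for i in range(n):
--         left_index = -1
--         right_index = -1
--
--         # Check left side
--         for j in range(i - 1, -1, -1):
--             if heights[j] < heights[i]:
--                 left_index = j
--                 break
--
--         # Check right side
--         for k in range(i + 1, n):
--             if heights[k] < heights[i]:
--                 right_index = k
--                 break
--
--         # Compare distances
--         if left_index == -1:
--             result[i] = right_index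
--         elif right_index == -1:
--             result[i] = left_index
--         else:
--             if abs(i - left_index) < abs(i - right_index):
--                 result[i] = left_index
--             elif abs(i - left_index) > abs(i - right_index):
--                 result[i] = right_index
--             else:  # Same distance, choose the shorter one
--                 if heights[left_index] <= heights[right_index]:
--                     result[i] = left_index
--                 else:
--                     result[i] = right_index
--
--     return result
-- ===== SOURCE B (Python) =====
-- def nearest_shorter_tower(heights):
--     n = len(heights)
--     left = [-1] * n
--     stack = []
--     for i in range(n):
--         while stack and heights[stack[-1]] >= heights[i]:
--             stack.pop()
--         if stack:
--             left[i] = stack[-1]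
--         stack.append(i)
--
--     right = [-1] * n
--     stack = []
--     for i in range(n - 1, -1, -1):
--         while stack and heights[stack[-1]] >= heights[i]:
--             stack.pop()
--         if stack:
--             right[i] = stack[-1]
--         stack.append(i)
--
--     result = []
--     for i in range(n):
--         li, ri = left[i], right[i]
--         if li == -1:
--             result.append(ri)
--         elif ri == -1:
--             result.append(li)
--         elif i - li < ri - i:
--             result.append(li)
--         elif i - li > ri - i:
--             result.append(ri)
--         else:
--             result.append(li if heights[li] <= heights[ri] else ri)
--     return result
-- ===== Notes on version B (the rewrite author's own statement) =====
-- stated objective: faster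
-- what changed: Replaced the per-index linear scans left and right (O(n^2)) with two monotonic-stack passes computing nearest-smaller-to-left and nearest-smaller-to-right in O(n), then the same distance/tie combine.
import Mathlib
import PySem

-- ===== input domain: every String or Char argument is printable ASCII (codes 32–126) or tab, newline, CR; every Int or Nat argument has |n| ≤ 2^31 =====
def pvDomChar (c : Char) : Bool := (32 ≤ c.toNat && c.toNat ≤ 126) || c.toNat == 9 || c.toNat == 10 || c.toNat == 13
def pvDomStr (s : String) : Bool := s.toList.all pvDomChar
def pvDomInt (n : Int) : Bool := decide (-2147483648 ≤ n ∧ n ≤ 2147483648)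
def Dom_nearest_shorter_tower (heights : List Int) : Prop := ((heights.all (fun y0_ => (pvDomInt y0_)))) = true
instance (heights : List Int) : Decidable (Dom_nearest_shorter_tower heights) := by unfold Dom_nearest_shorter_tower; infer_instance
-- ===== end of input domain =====

-- B replaces A's per-index O(n^2) left/right scans by two O(n) monotonic-stack passes; same combine logic.

-- ===== PORT A =====
-- `for j in range(i-1,-1,-1): if heights[j] < heights[i]: left_index = j; break`
def pvFindFirst (heights : List Int) (i : Nat) : List Nat → Int
  | [] => -1
  | j :: rest =>
    if heights.getD j 0 < heights.getD i 0 then (j : Int) else pvFindFirst heights i rest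

def nearest_shorter_tower (heights : List Int) : List Int :=
  let n := heights.length
  (List.range n).map (fun i =>
    let left_index := pvFindFirst heights i (List.range i).reverse
    let right_index := pvFindFirst heights i (List.range' (i + 1) (n - (i + 1)))
    if left_index = -1 then right_index
    else if right_index = -1 then left_index
    else if |(i : Int) - left_index| < |(i : Int) - right_index| then left_index
    else if |(i : Int) - left_index| > |(i : Int) - right_index| then right_index
    else if heights.getD left_index.toNat 0 ≤ heights.getD right_index.toNat 0 then left_index
    else right_index)

-- ===== PORT B =====
-- `while stack and heights[stack[-1]] >= heights[i]: stack.pop()`  (stack head = top)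
def pvPop (heights : List Int) (hi : Int) : List Nat → List Nat
  | [] => []
  | t :: rest => if heights.getD t 0 ≥ hi then pvPop heights hi rest else t :: rest

def pvPeek : List Nat → Int
  | [] => -1
  | t :: _ => (t : Int)

-- left pass: foldl over i = 0..n-1; the produced list is accumulated reversed
def pvLeftStep (heights : List Int) (st : List Nat × List Int) (i : Nat) : List Nat × List Int :=
  let s := pvPop heights (heights.getD i 0) st.1
  (i :: s, pvPeek s :: st.2)

-- right pass: foldl over i = n-1..0; consing yields the list in index order
def nearest_shorter_tower_alt (heights : List Int) : List Int :=
  let n := heights.length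
  let left := ((List.range n).foldl (pvLeftStep heights) ([], [])).2.reverse
  let right := (((List.range n).reverse).foldl (pvLeftStep heights) ([], [])).2
  (List.range n).map (fun i =>
    let li := left.getD i (-1)
    let ri := right.getD i (-1)
    if li = -1 then ri
    else if ri = -1 then li
    else if (i : Int) - li < ri - (i : Int) then li
    else if (i : Int) - li > ri - (i : Int) then ri
    else if heights.getD li.toNat 0 ≤ heights.getD ri.toNat 0 then li
    else ri)

-- ===== PRECONDITION & SPEC =====
def Spec_nearest_shorter_tower (heights : List Int) (out : List Int) : Prop := out = nearest_shorter_tower_alt heights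
instance (heights : List Int) (out : List Int) : Decidable (Spec_nearest_shorter_tower heights out) := by unfold Spec_nearest_shorter_tower; infer_instance

-- ===== CLAIM (what is proved, stated in full; the proofs are below) =====
def Claim_equal_nearest_shorter_tower : Prop := ∀ (heights : List Int), Dom_nearest_shorter_tower heights → Spec_nearest_shorter_tower heights (nearest_shorter_tower heights)

-- ===== LEMMAS AND PROOFS =====

-- first index j in [m-1, m-2, ..., 0] with heights[j] < v, else -1
def scanTo (heights : List Int) : Nat → Int → Int
  | 0, _ => -1
  | m + 1, v => if heights.getD m 0 < v then (m : Int) else scanTo heights m v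

-- first index k in [m, m+1, ..., m+fuel-1] with heights[k] < v, else -1
def scanFromF (heights : List Int) : Nat → Nat → Int → Int
  | 0, _, _ => -1
  | k + 1, m, v => if heights.getD m 0 < v then (m : Int) else scanFromF heights k (m + 1) v

-- first element of the stack with height < v, else -1
def firstBelow (heights : List Int) (v : Int) : List Nat → Int
  | [] => -1
  | t :: rest => if heights.getD t 0 < v then (t : Int) else firstBelow heights v rest

theorem pvFindFirst_left (heights : List Int) (i m : Nat) :
    pvFindFirst heights i (List.range m).reverse = scanTo heights m (heights.getD i 0) := by
  induction m with
  | zero => rfl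
  | succ m ih =>
    rw [List.range_succ, List.reverse_append]
    simp only [List.reverse_singleton, List.singleton_append, pvFindFirst, scanTo, ih]

theorem pvFindFirst_right (heights : List Int) (i : Nat) (k m : Nat) :
    pvFindFirst heights i (List.range' m k) = scanFromF heights k m (heights.getD i 0) := by
  induction k generalizing m with
  | zero => rfl
  | succ k ih => simp only [List.range'_succ, pvFindFirst, scanFromF, ih]

theorem scanTo_bounds (heights : List Int) (m : Nat) (v : Int) :
    scanTo heights m v = -1 ∨ (0 ≤ scanTo heights m v ∧ scanTo heights m v < (m : Int)) := by
  induction m with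
  | zero => left; rfl
  | succ m ih =>
    simp only [scanTo]
    split
    · right; constructor <;> omega
    · rcases ih with h | h
      · left; exact h
      · right; constructor <;> omega

theorem scanFromF_bounds (heights : List Int) (k m : Nat) (v : Int) :
    scanFromF heights k m v = -1 ∨
      ((m : Int) ≤ scanFromF heights k m v ∧ scanFromF heights k m v < (m : Int) + k) := by
  induction k generalizing m with
  | zero => left; rfl
  | succ k ih =>
    simp only [scanFromF]
    split
    · right; constructor <;> omega
    · rcases ih (m + 1) with h | h
      · left; exact h
      · right; push_cast at h ⊢; constructor <;> omega

theorem firstBelow_pop (heights : List Int) (hi v : Int) (hv : v ≤ hi) (S : List Nat) :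
    firstBelow heights v (pvPop heights hi S) = firstBelow heights v S := by
  induction S with
  | nil => rfl
  | cons t rest ih =>
    simp only [pvPop]
    split
    · rename_i hge
      rw [ih, firstBelow, if_neg (by omega)]
    · rfl

theorem pvPeek_pop (heights : List Int) (hi : Int) (S : List Nat) :
    pvPeek (pvPop heights hi S) = firstBelow heights hi S := by
  induction S with
  | nil => rfl
  | cons t rest ih =>
    simp only [pvPop, firstBelow]
    split
    · rename_i h; rw [ih, if_neg (by omega)]
    · rename_i h; rw [if_pos (by omega)]; rfl

-- LEFT PASS: invariant "firstBelow S = scanTo m" is preserved; the accumulator collects scanTo values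
theorem leftPass (heights : List Int) (k : Nat) :
    ∀ (m : Nat) (S : List Nat) (acc : List Int),
      (∀ v, firstBelow heights v S = scanTo heights m v) →
      ((List.range' m k).foldl (pvLeftStep heights) (S, acc)).2 =
        ((List.range' m k).map (fun i => scanTo heights i (heights.getD i 0))).reverse ++ acc := by
  induction k with
  | zero => intro m S acc _; rfl
  | succ k ih =>
    intro m S acc hInv
    have hstep : ∀ v, firstBelow heights v (m :: pvPop heights (heights.getD m 0) S)
        = scanTo heights (m + 1) v := by
      intro v
      simp only [firstBelow, scanTo]
      split
      · rfl
      · rename_i h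
        rw [firstBelow_pop heights _ v (by omega), hInv]
    have hpeek : pvPeek (pvPop heights (heights.getD m 0) S)
        = scanTo heights m (heights.getD m 0) := by
      rw [pvPeek_pop, hInv]
    rw [List.range'_succ]
    simp only [List.foldl_cons, List.map_cons, List.reverse_cons]
    rw [show pvLeftStep heights (S, acc) m
        = (m :: pvPop heights (heights.getD m 0) S,
            scanTo heights m (heights.getD m 0) :: acc) by
      simp only [pvLeftStep]; rw [hpeek]]
    rw [ih (m + 1) _ _ hstep]
    simp

-- RIGHT PASS: processing indices m-1 .. 0 (reversed range) with invariant "firstBelow S = scanFromF (n-m) m"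
theorem rightPass (heights : List Int) (n : Nat) (m : Nat) (hm : m ≤ n) :
    ∀ (S : List Nat) (acc : List Int),
      (∀ v, firstBelow heights v S = scanFromF heights (n - m) m v) →
      ((List.range m).reverse.foldl (pvLeftStep heights) (S, acc)).2 =
        ((List.range m).map
          (fun i => scanFromF heights (n - (i + 1)) (i + 1) (heights.getD i 0))) ++ acc := by
  induction m with
  | zero => intro S acc _; rfl
  | succ m ih =>
    intro S acc hInv
    have hstep : ∀ v, firstBelow heights v (m :: pvPop heights (heights.getD m 0) S)
        = scanFromF heights (n - m) m v := by
      intro v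
      simp only [firstBelow]
      have hnm : n - m = (n - (m + 1)) + 1 := by omega
      rw [hnm, scanFromF]
      split
      · rfl
      · rename_i h
        rw [firstBelow_pop heights _ v (by omega), hInv]
    have hpeek : pvPeek (pvPop heights (heights.getD m 0) S)
        = scanFromF heights (n - (m + 1)) (m + 1) (heights.getD m 0) := by
      rw [pvPeek_pop, hInv]
    rw [List.range_succ]
    simp only [List.reverse_append, List.reverse_singleton, List.singleton_append,
      List.foldl_cons, List.map_append, List.map_cons, List.map_nil]
    rw [show pvLeftStep heights (S, acc) m
        = (m :: pvPop heights (heights.getD m 0) S,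
            scanFromF heights (n - (m + 1)) (m + 1) (heights.getD m 0) :: acc) by
      simp only [pvLeftStep]; rw [hpeek]]
    rw [ih (by omega) _ _ hstep]
    simp

theorem getD_map_range {α : Type} (f : Nat → α) (n i : Nat) (hi : i < n) (d : α) :
    ((List.range n).map f).getD i d = f i := by
  rw [List.getD_eq_getElem?_getD, List.getElem?_map]
  simp [hi]

-- ===== VERDICT (by name: the statement is the Claim_ definition above) =====
theorem nearest_shorter_tower_spec : Claim_equal_nearest_shorter_tower := by
  intro heights _
  unfold Spec_nearest_shorter_tower nearest_shorter_tower nearest_shorter_tower_alt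
  simp only []
  set n := heights.length with hn
  have hleft : ((List.range n).foldl (pvLeftStep heights) ([], [])).2.reverse
      = (List.range n).map (fun i => scanTo heights i (heights.getD i 0)) := by
    rw [List.range_eq_range']
    rw [leftPass heights n 0 [] [] (fun v => rfl)]
    simp
  have hright : (((List.range n).reverse).foldl (pvLeftStep heights) ([], [])).2
      = (List.range n).map
          (fun i => scanFromF heights (n - (i + 1)) (i + 1) (heights.getD i 0)) := by
    rw [rightPass heights n n le_rfl [] []
      (by intro v; simp only [Nat.sub_self]; rfl)]
    simp
  rw [hleft, hright]
  apply List.map_congr_left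
  intro i hi
  rw [List.mem_range] at hi
  rw [getD_map_range _ n i hi, getD_map_range _ n i hi]
  rw [pvFindFirst_left, pvFindFirst_right]
  set li := scanTo heights i (heights.getD i 0) with hli
  set ri := scanFromF heights (n - (i + 1)) (i + 1) (heights.getD i 0) with hri
  by_cases h1 : li = -1
  · simp [h1]
  · rcases scanTo_bounds heights i (heights.getD i 0) with h | hb
    · exact absurd h h1
    rw [if_neg h1, if_neg h1]
    by_cases h2 : ri = -1
    · simp [h2]
    · rcases scanFromF_bounds heights (n - (i + 1)) (i + 1) (heights.getD i 0) with h | hb2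
      · exact absurd h h2
      rw [if_neg h2, if_neg h2]
      have habsL : |(i : Int) - li| = (i : Int) - li := by
        rw [abs_of_nonneg]; omega
      have habsR : |(i : Int) - ri| = ri - (i : Int) := by
        rw [abs_of_nonpos (by push_cast at hb2 ⊢; omega)]; omega
      rw [habsL, habsR]
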